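-- pv_equiv track=rewrite | github.com/pypi-data/pypi-mirror-396 | packages/relace-mcp/relace_mcp-0.1.5-py3-none-any.whl/relace_mcp/tools/apply.py | _anchor_precheck
-- ===== SOURCE A (Python) =====
-- def _anchor_precheck(concrete_lines: list[str], initial_code: str) -> bool:
--     """檢查 concrete lines 是否至少有足夠的 anchor 能在 initial_code 中定位。
--
--     使用寬鬆比對（strip() 後），避免因縮排/空白差異被誤判。
--     過濾太短的行（如 }、return）以避免誤判命中。
--
--     Args:
--         concrete_lines: 非 placeholder 的行。
--         initial_code: 原始檔案內容。
--
--     Returns: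
--         若至少命中 2 行有效 anchor 則 True，否則 False。
--     """
--     if not concrete_lines:
--         return False
--
--     # 過濾掉純 directive 行（如 "// remove BlockName"）
--     # 這些行不應該用來定位 anchor
--     directive_patterns = ("// remove ", "# remove ")
--     anchor_lines = [
--         line
--         for line in concrete_lines
--         if not any(line.strip().startswith(pat) for pat in directive_patterns)
--     ]
--
--     if not anchor_lines:
--         # 只有 directive，沒有真實 anchor
--         return False
--
--     # 統計命中的有效 anchor 數量
--     MIN_ANCHOR_LENGTH = 10  # 最短有效 anchor 長度（避免 }、return 等短行誤判）
--     MIN_ANCHOR_HITS = 2  # 最少需要命中的 anchor 數量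
--
--     hit_count = 0
--     for line in anchor_lines:
--         stripped = line.strip()
--         # 只計算足夠長的行，避免 }、return、pass 等短行誤判
--         if len(stripped) >= MIN_ANCHOR_LENGTH and stripped in initial_code:
--             hit_count += 1
--             if hit_count >= MIN_ANCHOR_HITS:
--                 return True
--
--     # 如果只有一個有效 anchor 但它足夠特殊（長度 >= 20），也接受
--     if hit_count == 1:
--         for line in anchor_lines:
--             stripped = line.strip()
--             if len(stripped) >= 20 and stripped in initial_code:
--                 return True
--
--     return False
-- ===== SOURCE B (Python) =====
-- def _anchor_precheck(concrete_lines: list[str], initial_code: str) -> bool: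
--     if not concrete_lines:
--         return False
--
--     anchors = [
--         line.strip()
--         for line in concrete_lines
--         if not line.strip().startswith(("// remove ", "# remove "))
--     ]
--     if not anchors:
--         return False
--
--     hit_count = 0
--     has_long = False
--     for stripped in anchors:
--         if len(stripped) >= 10 and stripped in initial_code:
--             hit_count += 1
--             if len(stripped) >= 20:
--                 has_long = True
--
--     return hit_count >= 2 or (hit_count == 1 and has_long)
-- ===== Notes on version B (the rewrite author's own statement) =====
-- stated objective: faster
-- what changed: Replaces A's early-exit counting loop plus a second full rescan for a long anchor by one pass over pre-stripped lines maintaining (hit_count, has_long) and deciding the result with a final boolean formula; each line is stripped once instead of up to twice.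
import Mathlib
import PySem

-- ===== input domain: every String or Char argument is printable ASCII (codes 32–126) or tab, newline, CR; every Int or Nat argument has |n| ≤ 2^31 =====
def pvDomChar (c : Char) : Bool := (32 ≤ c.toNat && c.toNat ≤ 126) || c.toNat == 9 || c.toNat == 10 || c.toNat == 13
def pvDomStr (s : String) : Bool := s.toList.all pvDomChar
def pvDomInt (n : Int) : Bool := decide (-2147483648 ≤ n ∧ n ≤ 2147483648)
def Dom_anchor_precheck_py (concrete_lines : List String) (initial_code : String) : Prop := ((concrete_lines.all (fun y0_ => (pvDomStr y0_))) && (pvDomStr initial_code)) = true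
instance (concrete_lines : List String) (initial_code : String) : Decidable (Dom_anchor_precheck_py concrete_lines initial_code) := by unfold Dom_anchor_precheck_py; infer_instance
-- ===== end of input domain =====

-- B replaces A's early-exit counting loop plus a second rescan for a long anchor by one
-- pre-stripped pass maintaining (hit_count, has_long) and a final boolean formula (objective: simpler).

-- ===== PORT A =====
-- counting loop with early return at 2 hits
def anchorHitLoopA (code : String) (hit : Nat) : List String → Bool × Nat
  | [] => (false, hit)
  | line :: rest =>
    let stripped := PySem.Str.strip line
    if decide (10 ≤ PySem.Str.len stripped) && PySem.Str.isIn stripped code then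
      if 2 ≤ hit + 1 then (true, hit + 1)
      else anchorHitLoopA code (hit + 1) rest
    else anchorHitLoopA code hit rest

-- second for-loop with early return True
def anchorSecondLoopA (code : String) : List String → Bool
  | [] => false
  | line :: rest =>
    let stripped := PySem.Str.strip line
    if decide (20 ≤ PySem.Str.len stripped) && PySem.Str.isIn stripped code then true
    else anchorSecondLoopA code rest

def anchor_precheck_py (concrete_lines : List String) (initial_code : String) : Bool :=
  if concrete_lines = [] then false
  else
    let anchor_lines := concrete_lines.filter (fun line =>
      !(["// remove ", "# remove "].any
          (fun pat => PySem.Str.startswith (PySem.Str.strip line) pat)))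
    if anchor_lines = [] then false
    else
      match anchorHitLoopA initial_code 0 anchor_lines with
      | (true, _) => true
      | (false, hit_count) =>
        if hit_count = 1 then anchorSecondLoopA initial_code anchor_lines else false

-- ===== PORT B =====
def anchor_precheck_py_alt (concrete_lines : List String) (initial_code : String) : Bool :=
  if concrete_lines = [] then false
  else
    let anchors := (concrete_lines.filter (fun line =>
      !(PySem.Str.startswith (PySem.Str.strip line) "// remove " ||
        PySem.Str.startswith (PySem.Str.strip line) "# remove "))).map PySem.Str.strip
    if anchors = [] then false
    else
      let st := anchors.foldl (fun (st : Nat × Bool) stripped =>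
        if decide (10 ≤ PySem.Str.len stripped) && PySem.Str.isIn stripped initial_code then
          (st.1 + 1, if decide (20 ≤ PySem.Str.len stripped) then true else st.2)
        else st) (0, false)
      decide (2 ≤ st.1) || (decide (st.1 = 1) && st.2)

-- ===== PRECONDITION & SPEC =====
def Spec_anchor_precheck_py (concrete_lines : List String) (initial_code : String) (out : Bool) : Prop := out = anchor_precheck_py_alt concrete_lines initial_code
instance (concrete_lines : List String) (initial_code : String) (out : Bool) : Decidable (Spec_anchor_precheck_py concrete_lines initial_code out) := by unfold Spec_anchor_precheck_py; infer_instance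

-- ===== CLAIM (what is proved, stated in full; the proofs are below) =====
def Claim_equal_anchor_precheck_py : Prop := ∀ (concrete_lines : List String) (initial_code : String), Dom_anchor_precheck_py concrete_lines initial_code → Spec_anchor_precheck_py concrete_lines initial_code (anchor_precheck_py concrete_lines initial_code)

-- ===== LEMMAS AND PROOFS =====

-- the "counts as a hit" predicate on an already-stripped line
def pvMatch (code s : String) : Bool :=
  decide (10 ≤ PySem.Str.len s) && PySem.Str.isIn s code

lemma foldGen {a : Type} (m g : a → Bool) (L : List a) : ∀ (h : Nat) (b : Bool),
    L.foldl (fun (st : Nat × Bool) s =>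
      if m s then (st.1 + 1, if g s then true else st.2) else st) (h, b)
    = (h + L.countP m, b || L.any (fun s => m s && g s)) := by
  induction L with
  | nil => simp
  | cons x xs ih =>
    intro h b
    simp only [List.foldl_cons, List.countP_cons, List.any_cons]
    by_cases hm : m x = true
    · rw [if_pos hm, if_pos hm, ih]
      by_cases hg : g x = true
      · rw [if_pos hg]
        simp only [hm, hg, Prod.mk.injEq, Bool.true_and, Bool.true_or, Bool.or_true]
        exact ⟨by omega, trivial⟩
      · rw [if_neg hg]
        simp only [hm, Bool.true_and, Prod.mk.injEq]
        constructor
        · omega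
        · cases hgx : g x
          · simp
          · exact absurd hgx hg
    · rw [if_neg hm, if_neg hm, ih]
      simp only [Prod.mk.injEq, Nat.add_zero, true_and]
      cases hmx : m x
      · simp
      · exact absurd hmx hm

lemma foldB_spec (code : String) (L : List String) : ∀ (h : Nat) (b : Bool),
    L.foldl (fun (st : Nat × Bool) stripped =>
      if decide (10 ≤ PySem.Str.len stripped) && PySem.Str.isIn stripped code then
        (st.1 + 1, if decide (20 ≤ PySem.Str.len stripped) then true else st.2)
      else st) (h, b)
    = (h + L.countP (pvMatch code),
       b || L.any (fun s => pvMatch code s && decide (20 ≤ PySem.Str.len s))) := by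
  intro h b
  exact foldGen (fun s => decide (10 ≤ PySem.Str.len s) && PySem.Str.isIn s code)
    (fun s => decide (20 ≤ PySem.Str.len s)) L h b

lemma hitLoopA_spec (code : String) (L : List String) : ∀ (h : Nat), h ≤ 1 →
    anchorHitLoopA code h L =
      (if h + L.countP (fun l => pvMatch code (PySem.Str.strip l)) < 2
       then (false, h + L.countP (fun l => pvMatch code (PySem.Str.strip l)) )
       else (true, 2)) := by
  induction L with
  | nil =>
    intro h hh
    simp only [anchorHitLoopA, List.countP_nil]
    rw [if_pos (by omega)]
    simp
  | cons x xs ih =>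
    intro h hh
    simp only [anchorHitLoopA, List.countP_cons, pvMatch]
    by_cases hc : (decide (10 ≤ PySem.Str.len (PySem.Str.strip x)) && PySem.Str.isIn (PySem.Str.strip x) code) = true
    · rw [if_pos hc, if_pos hc]
      by_cases h1 : h = 1
      · subst h1
        rw [if_pos (by omega), if_neg (by omega)]
      · have h0 : h = 0 := by omega
        subst h0
        rw [if_neg (by omega), ih 1 (by omega)]
        by_cases hlt : 1 + xs.countP (fun l => pvMatch code (PySem.Str.strip l)) < 2
        · rw [if_pos hlt, if_pos (by simp only [pvMatch] at hlt ⊢; omega)]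
          simp only [pvMatch] at hlt ⊢
          simp only [Prod.mk.injEq, true_and]
          omega
        · rw [if_neg hlt, if_neg (by simp only [pvMatch] at hlt ⊢; omega)]
    · rw [if_neg hc, if_neg hc, ih h hh]
      by_cases hlt : h + xs.countP (fun l => pvMatch code (PySem.Str.strip l)) < 2
      · rw [if_pos hlt, if_pos (by simp only [pvMatch] at hlt ⊢; omega)]
        simp only [pvMatch] at hlt ⊢
        simp only [Prod.mk.injEq, true_and]
        omega
      · rw [if_neg hlt, if_neg (by simp only [pvMatch] at hlt ⊢; omega)]

lemma bool_second (p q i r : Bool) (himp : p = true → q = true) :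
    (if p && i then true else r) = (((q && i) && p) || r) := by
  cases p <;> cases q <;> cases i <;> cases r <;> simp_all

lemma secondLoopA_spec (code : String) (L : List String) :
    anchorSecondLoopA code L =
      L.any (fun l => pvMatch code (PySem.Str.strip l) && decide (20 ≤ PySem.Str.len (PySem.Str.strip l))) := by
  induction L with
  | nil => simp [anchorSecondLoopA]
  | cons x xs ih =>
    simp only [anchorSecondLoopA, List.any_cons, ih, pvMatch]
    exact bool_second _ _ _ _ (fun hp => by
      have h20 := of_decide_eq_true hp
      exact decide_eq_true (by omega))

lemma filter_pred_eq (concrete_lines : List String) :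
    concrete_lines.filter (fun line =>
      !(["// remove ", "# remove "].any
          (fun pat => PySem.Str.startswith (PySem.Str.strip line) pat)))
    = concrete_lines.filter (fun line =>
      !(PySem.Str.startswith (PySem.Str.strip line) "// remove " ||
        PySem.Str.startswith (PySem.Str.strip line) "# remove ")) := by
  apply List.filter_congr
  intro x _
  simp [List.any_cons]

-- ===== VERDICT (by name: the statement is the Claim_ definition above) =====
theorem anchor_precheck_py_spec : Claim_equal_anchor_precheck_py := by
  intro cl code _
  unfold Spec_anchor_precheck_py anchor_precheck_py anchor_precheck_py_alt
  by_cases hnil : cl = []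
  · simp [hnil]
  · simp only [hnil, if_false]
    rw [← filter_pred_eq]
    set AL := cl.filter (fun line =>
      !(["// remove ", "# remove "].any
          (fun pat => PySem.Str.startswith (PySem.Str.strip line) pat))) with hAL
    by_cases hALnil : AL = []
    · simp [hALnil]
    · have hmapnil : AL.map PySem.Str.strip ≠ [] := by simp [hALnil]
      simp only [hALnil, if_false, hmapnil, if_false]
      rw [foldB_spec, hitLoopA_spec code AL 0 (by omega)]
      rw [List.countP_map, List.any_map]
      simp only [Function.comp_def, Nat.zero_add, Bool.false_or]
      set c := AL.countP (fun l => pvMatch code (PySem.Str.strip l)) with hc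
      by_cases hc2 : 2 ≤ c
      · rw [if_neg (by omega), decide_eq_true hc2]
        simp
      · rw [if_pos (by omega), decide_eq_false hc2, Bool.false_or]
        by_cases hc1 : c = 1
        · simp only [if_pos hc1, decide_eq_true hc1, Bool.true_and]
          exact secondLoopA_spec code AL
        · simp only [if_neg hc1, decide_eq_false hc1, Bool.false_and]
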